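-- pv_equiv track=rewrite | github.com/dolr-ai/ai-feed-recommendation-system | src/async_mixer.py | _intersperse_ugc
-- ===== SOURCE A (Python) =====
-- from typing import List, Dict, Optional
--
-- def _intersperse_ugc(
--
--     videos: List[str],
--     ugc_videos: List[str],
--     total_count: int
-- ) -> List[str]:
--     """
--     Intersperse UGC videos throughout the feed at roughly even intervals.
--
--     This ensures UGC content is distributed across the feed rather than
--     clustered at the beginning or end.
--
--     Algorithm:
--         1. Calculate interval: len(videos) / (len(ugc) + 1)
--         2. Insert each UGC video at position: interval * (i + 1)
--         3. Adjust for list bounds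
--
--     Args:
--         videos: Base video list (pop + fresh + following)
--         ugc_videos: UGC videos to intersperse
--         total_count: Target total count
--
--     Returns:
--         Combined list with UGC interspersed
--     """
--     if not ugc_videos:
--         return videos
--
--     result = list(videos)
--     interval = max(1, len(result) // (len(ugc_videos) + 1))
--
--     for i, ugc_vid in enumerate(ugc_videos):
--         insert_pos = min((i + 1) * interval, len(result))
--         result.insert(insert_pos, ugc_vid)
--
--     return result
-- ===== SOURCE B (Python) =====
-- def _intersperse_ugc(videos, ugc_videos, total_count):
--     if not ugc_videos:
--         return videos
--     n = len(videos)
--     k = len(ugc_videos)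
--     interval = max(1, n // (k + 1))
--     # Stage 1: the final number of base videos before each UGC video, in closed
--     # form (A's shifting insert positions resolved once).
--     cuts = [min((i + 1) * interval - i, n) for i in range(k)]
--     # Stage 2: one merge pass over the precomputed cut points.
--     out = []
--     prev = 0
--     for u, c in zip(ugc_videos, cuts):
--         out += videos[prev:c]
--         out.append(u)
--         prev = c
--     out += videos[prev:]
--     return out
-- ===== Notes on version B (the rewrite author's own statement) =====
-- stated objective: faster
-- what changed: B first computes every UGC video's final cut point in closed form as a list, then builds the result in one zip-merge pass, instead of A's repeated list.insert each of which shifts the whole tail.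
import Mathlib
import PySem

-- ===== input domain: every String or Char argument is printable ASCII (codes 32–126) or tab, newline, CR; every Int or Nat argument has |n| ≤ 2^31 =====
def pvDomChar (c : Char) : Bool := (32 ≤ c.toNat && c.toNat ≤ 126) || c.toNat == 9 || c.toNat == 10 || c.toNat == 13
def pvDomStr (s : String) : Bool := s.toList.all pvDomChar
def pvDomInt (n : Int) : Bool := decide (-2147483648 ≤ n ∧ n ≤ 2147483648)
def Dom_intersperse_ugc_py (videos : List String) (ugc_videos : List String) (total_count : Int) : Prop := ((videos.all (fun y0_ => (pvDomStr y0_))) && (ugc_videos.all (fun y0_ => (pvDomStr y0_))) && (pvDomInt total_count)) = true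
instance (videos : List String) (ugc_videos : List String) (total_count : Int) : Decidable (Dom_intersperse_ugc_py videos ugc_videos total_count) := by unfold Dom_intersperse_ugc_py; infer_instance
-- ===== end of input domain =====

-- B precomputes every UGC video's final cut point in closed form, then merges in one pass,
-- replacing A's loop of O(n) list.insert calls (faster).

-- ===== PORT A =====
def intersperse_ugc_py (videos : List String) (ugc_videos : List String) (total_count : Int) : List String :=
  if ugc_videos = [] then videos
  else
    let interval : Int := max 1 (PySem.Int.floordiv (videos.length : Int) ((ugc_videos.length : Int) + 1))
    (PySem.List.enumerate ugc_videos 0).foldl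
      (fun result iu =>
        let insert_pos : Int := min ((iu.1 + 1) * interval) (result.length : Int)
        PySem.List.insert result insert_pos iu.2) videos

-- ===== PORT B =====
-- stage 1 of Source B: the cut-point list  [min((i+1)*interval - i, n) for i in range(k)]
def pvCuts (n : Int) (interval : Int) (k : Int) : List Int :=
  (PySem.List.pyRange 0 k 1).map (fun i => min ((i + 1) * interval - i) n)

-- stage 2 of Source B: the zip-merge loop, written as structural recursion on the pair list
def pvZipMerge (videos : List String) : List (String × Int) → Int → List String
  | [], prev => PySem.List.slice videos (some prev) none
  | (u, c) :: rest, prev =>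
      PySem.List.slice videos (some prev) (some c) ++ u :: pvZipMerge videos rest c

def intersperse_ugc_py_alt (videos : List String) (ugc_videos : List String) (total_count : Int) : List String :=
  if ugc_videos = [] then videos
  else
    let n : Int := (videos.length : Int)
    let interval : Int := max 1 (PySem.Int.floordiv n ((ugc_videos.length : Int) + 1))
    pvZipMerge videos (ugc_videos.zip (pvCuts n interval (ugc_videos.length : Int))) 0

-- ===== PRECONDITION & SPEC =====
def Spec_intersperse_ugc_py (videos : List String) (ugc_videos : List String) (total_count : Int) (out : List String) : Prop := out = intersperse_ugc_py_alt videos ugc_videos total_count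
instance (videos : List String) (ugc_videos : List String) (total_count : Int) (out : List String) : Decidable (Spec_intersperse_ugc_py videos ugc_videos total_count out) := by unfold Spec_intersperse_ugc_py; infer_instance

-- ===== CLAIM (what is proved, stated in full; the proofs are below) =====
def Claim_equal_intersperse_ugc_py : Prop := ∀ (videos : List String) (ugc_videos : List String) (total_count : Int), Dom_intersperse_ugc_py videos ugc_videos total_count → Spec_intersperse_ugc_py videos ugc_videos total_count (intersperse_ugc_py videos ugc_videos total_count)

-- ===== LEMMAS AND PROOFS =====

-- Common normal form: the interleaving written as a right recursion carrying the index i.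
def pvMerge (videos : List String) (interval : Int) : List String → Int → Int → List String
  | [], _, prev => PySem.List.slice videos (some prev) none
  | u :: us, i, prev =>
      let c : Int := min ((i + 1) * interval - i) (videos.length : Int)
      PySem.List.slice videos (some prev) (some c) ++ u :: pvMerge videos interval us (i + 1) c

-- B's zip-merge over the precomputed cut list is the indexed normal form.
lemma pvB_loop (videos : List String) (interval : Int) :
    ∀ (us : List String) (i : Int) (prev : Int),
    pvZipMerge videos
        (us.zip ((PySem.List.pyRange i (i + (us.length : Int)) 1).map
          (fun j => min ((j + 1) * interval - j) (videos.length : Int)))) prev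
      = pvMerge videos interval us i prev := by
  intro us
  induction us with
  | nil => intro i prev; simp [pvZipMerge, pvMerge]
  | cons u us ih =>
      intro i prev
      have hlt : i < i + ((u :: us).length : Int) := by simp
      rw [PySem.List.pyRange_one_cons hlt]
      have harg : i + ((u :: us).length : Int) = (i + 1) + (us.length : Int) := by
        simp; ring
      rw [harg]
      simp only [List.map_cons, List.zip_cons_cons, pvZipMerge, pvMerge]
      rw [ih]

-- A's insert loop equals the indexed normal form.
lemma pvA_loop (videos : List String) (interval : Int) (hI : 1 ≤ interval) :
    ∀ (us : List String) (i prev : Nat) (done : List String),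
    prev ≤ videos.length →
    done.length = prev + i →
    (prev : Int) + (i : Int) ≤ ((i : Int) + 1) * interval →
    (PySem.List.enumerate us (i : Int)).foldl
        (fun result iu =>
          let insert_pos : Int := min ((iu.1 + 1) * interval) (result.length : Int)
          PySem.List.insert result insert_pos iu.2) (done ++ videos.drop prev)
      = done ++ pvMerge videos interval us (i : Int) (prev : Int) := by
  intro us
  induction us with
  | nil =>
      intro i prev done _ _ _
      simp [PySem.List.enumerate_nil, pvMerge, PySem.List.slice_from_natCast]
  | cons u us ih =>
      intro i prev done hprev hlen hpos
      have hn : (videos.drop prev).length = videos.length - prev := by simp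
      set cI : Int := min (((i : Int) + 1) * interval - (i : Int)) (videos.length : Int) with hcI
      have hcge : (prev : Int) ≤ cI := by
        have : (prev : Int) ≤ ((i : Int) + 1) * interval - (i : Int) := by omega
        exact le_min this (by exact_mod_cast hprev)
      have hcle : cI ≤ (videos.length : Int) := min_le_right _ _
      obtain ⟨cN, hcN⟩ : ∃ cN : Nat, cI = (cN : Nat) := by
        refine ⟨cI.toNat, ?_⟩
        have : 0 ≤ cI := le_trans (by positivity) hcge
        omega
      have hcNge : prev ≤ cN := by omega
      have hcNle : cN ≤ videos.length := by omega
      simp only [PySem.List.enumerate_cons, List.foldl_cons]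
      have hrlen : (done ++ videos.drop prev).length = videos.length + i := by
        simp [hlen]; omega
      have hposeq : min (((i : Int) + 1) * interval) (((done ++ videos.drop prev).length : Int))
          = ((cN + i : Nat) : Int) := by
        rw [hrlen]; push_cast
        have : cI = (cN : Int) := by exact_mod_cast hcN
        omega
      rw [hposeq, PySem.List.insert_natCast _ _ _ (by rw [hrlen]; omega)]
      have htake : (done ++ videos.drop prev).take (cN + i)
          = done ++ (videos.drop prev).take (cN - prev) := by
        have h1 : cN + i = done.length + (cN - prev) := by omega
        rw [h1, List.take_length_add_append]
      have hdrop : (done ++ videos.drop prev).drop (cN + i) = videos.drop cN := by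
        have h1 : cN + i = done.length + (cN - prev) := by omega
        rw [h1, List.drop_length_add_append, List.drop_drop]
        congr 1
        omega
      rw [htake, hdrop]
      have hre : done ++ (videos.drop prev).take (cN - prev) ++ u :: videos.drop cN
          = (done ++ (videos.drop prev).take (cN - prev) ++ [u]) ++ videos.drop cN := by
        simp [List.append_assoc]
      rw [hre]
      have hlen' : (done ++ (videos.drop prev).take (cN - prev) ++ [u]).length = cN + (i + 1) := by
        simp [hlen]
        omega
      have hpos' : (cN : Int) + ((i + 1 : Nat) : Int) ≤ (((i + 1 : Nat) : Int) + 1) * interval := by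
        push_cast
        have h1 : (cN : Int) ≤ ((i : Int) + 1) * interval - (i : Int) := by
          have : cI = (cN : Int) := by exact_mod_cast hcN
          omega
        nlinarith
      have := ih (i + 1) cN (done ++ (videos.drop prev).take (cN - prev) ++ [u]) hcNle hlen' hpos'
      push_cast at this
      rw [this]
      simp only [pvMerge, ← hcI, hcN]
      rw [PySem.List.slice_natCast]
      simp [List.append_assoc]

-- ===== VERDICT (by name: the statement is the Claim_ definition above) =====
theorem intersperse_ugc_py_spec : Claim_equal_intersperse_ugc_py := by
  intro videos ugc_videos total_count _
  unfold Spec_intersperse_ugc_py intersperse_ugc_py intersperse_ugc_py_alt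
  by_cases h : ugc_videos = []
  · simp [h]
  · simp only [h, if_false]
    set interval : Int := max 1 (PySem.Int.floordiv (videos.length : Int) ((ugc_videos.length : Int) + 1)) with hI
    have h1 : 1 ≤ interval := le_max_left _ _
    have hA := pvA_loop videos interval h1 ugc_videos 0 0 []
      (Nat.zero_le _) rfl (by push_cast; linarith)
    have hB := pvB_loop videos interval ugc_videos 0 0
    simp only [Nat.cast_zero, List.nil_append, List.drop_zero, zero_add] at hA hB
    rw [hA, ← hB]
    rfl
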